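-- pv_equiv track=rewrite | github.com/BiqiangWang/leetcode | daily/1781.py | dynamicProcess
-- ===== SOURCE A (Python) =====
-- from collections import Counter
--
-- def dynamicProcess(s):
--     ans, n = 0, len(s)
--     for i in range(n):
--         d = dict()
--         cnt = Counter()
--         for j in range(i, n):
--             if s[j] in d:
--                 d[s[j]] += 1
--             else:
--                 d.setdefault(s[j], 1)
--             ans += max(d.values()) - min(d.values())
--     return ans
-- ===== SOURCE B (Python) =====
-- def beauty(sub):
--     cnt = {}
--     for ch in sub:
--         cnt[ch] = cnt.get(ch, 0) + 1
--     return max(cnt.values()) - min(cnt.values())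
--
--
-- def dynamicProcess(s):
--     n = len(s)
--     return sum(beauty(s[i:j + 1]) for i in range(n) for j in range(i, n))
-- ===== Notes on version B (the rewrite author's own statement) =====
-- stated objective: simpler
-- what changed: B replaces A's incrementally maintained per-start dict (and its unused Counter) with a standalone beauty(sub) helper that recounts each substring from scratch, and the whole function becomes a single sum over all (i,j) pairs; O(n^3) repeated recount instead of A's O(n^2) incremental maintenance, but plainer.
import Mathlib
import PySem

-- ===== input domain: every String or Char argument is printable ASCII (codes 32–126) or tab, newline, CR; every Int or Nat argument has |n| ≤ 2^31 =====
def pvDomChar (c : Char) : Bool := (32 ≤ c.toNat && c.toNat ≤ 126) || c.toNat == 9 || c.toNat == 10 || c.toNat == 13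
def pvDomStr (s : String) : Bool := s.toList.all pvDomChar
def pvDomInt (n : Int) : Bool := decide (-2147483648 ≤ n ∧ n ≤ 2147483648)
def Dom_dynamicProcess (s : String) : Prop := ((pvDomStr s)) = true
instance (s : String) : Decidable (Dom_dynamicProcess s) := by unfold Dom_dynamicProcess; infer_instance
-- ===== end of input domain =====

-- Header: B computes each substring's beauty with a standalone helper that recounts the substring
-- from scratch and sums over all (i,j) pairs — simpler to read, not faster.


-- ===== PORT A =====
-- (A's local 'cnt = Counter()' is dead code — never read or written — and is not kept.)
-- one iteration of A's inner loop: update d with s[j] (increment if present, setdefault 1 otherwise),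
-- then ans += max(d.values()) - min(d.values()); d is never empty where Python reaches max/min,
-- the 'none' index branch is unreachable for j in range(i, n).
def dynAStep (s : String) (st : Int × PySem.Dict Char Int) (j : Int) : Int × PySem.Dict Char Int :=
  match PySem.Str.pyGet? s j with
  | none => st
  | some c =>
    let d := if st.2.contains c then st.2.insert c (st.2.getD c 0 + 1) else st.2.setdefault c 1
    (st.1 + (((PySem.List.max? d.values (fun v => v)).getD 0)
             - ((PySem.List.min? d.values (fun v => v)).getD 0)), d)

def dynamicProcess (s : String) : Int :=
  let n := PySem.Str.len s
  (PySem.List.pyRange 0 n).foldl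
    (fun ans i => ((PySem.List.pyRange i n).foldl (dynAStep s) (ans, PySem.Dict.empty)).1) 0

-- ===== PORT B =====
-- beauty(sub): count characters with a get-based dict loop, then max - min of the counts
-- (cnt is never empty where Python reaches max/min, so the 'none' branches are unreachable).
def beauty (cs : List Char) : Int :=
  let cnt : PySem.Dict Char Int := cs.foldl (fun d ch => d.insert ch (d.getD ch 0 + 1)) PySem.Dict.empty
  ((PySem.List.max? cnt.values (fun v => v)).getD 0)
    - ((PySem.List.min? cnt.values (fun v => v)).getD 0)

-- sum(beauty(s[i:j+1]) for i in range(n) for j in range(i, n))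
def dynamicProcess_alt (s : String) : Int :=
  let n := PySem.Str.len s
  ((PySem.List.pyRange 0 n).flatMap (fun i =>
    (PySem.List.pyRange i n).map (fun j =>
      beauty (PySem.Str.slice s (some i) (some (j + 1))).toList))).sum

-- ===== PRECONDITION & SPEC =====
def Spec_dynamicProcess (s : String) (out : Int) : Prop := out = dynamicProcess_alt s
instance (s : String) (out : Int) : Decidable (Spec_dynamicProcess s out) := by unfold Spec_dynamicProcess; infer_instance

-- ===== CLAIM (what is proved, stated in full; the proofs are below) =====
def Claim_equal_dynamicProcess : Prop := ∀ (s : String), Dom_dynamicProcess s → Spec_dynamicProcess s (dynamicProcess s)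

-- ===== LEMMAS AND PROOFS =====

theorem dynA_dict_step (d : PySem.Dict Char Int) (c : Char) :
    (if d.contains c then d.insert c (d.getD c 0 + 1) else d.setdefault c 1)
      = d.modify c 0 (· + 1) := by
  by_cases h : d.contains c = true
  · simp [PySem.Dict.modify, PySem.Dict.insert, h]
  · have h2 : ∀ p ∈ d.items, ¬(p.1 == c) = true := by
      intro p hp hpc
      exact h (List.any_eq_true.2 ⟨p, hp, hpc⟩)
    simp [PySem.Dict.modify, PySem.Dict.setdefault, PySem.Dict.insert, h,
      PySem.Dict.getD, PySem.Dict.get?, List.find?_eq_none.2 h2]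

theorem counter_snoc (l : List Char) (c : Char) :
    PySem.Dict.counter (l ++ [c]) = (PySem.Dict.counter l).modify c 0 (· + 1) := by
  simp [PySem.Dict.counter_eq_foldl, List.foldl_append]

-- B's term for the pair (i, j): the beauty of the recounted substring s[i:j+1]
def dynBTerm (s : String) (i j : Int) : Int :=
  beauty (PySem.Str.slice s (some i) (some (j + 1))).toList

theorem beauty_eq_counter (cs : List Char) :
    beauty cs = ((PySem.List.max? (PySem.Dict.counter cs).values (fun v => v)).getD 0)
      - ((PySem.List.min? (PySem.Dict.counter cs).values (fun v => v)).getD 0) := by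
  rw [beauty, PySem.Dict.foldl_insert_getD_add_one_eq_counter]

theorem inner_inv (s : String) (i m : Nat) (h : i + m ≤ s.toList.length) (ans : Int) :
    (PySem.List.pyRange (i : Int) ((i : Int) + (m : Int))).foldl (dynAStep s) (ans, PySem.Dict.empty)
      = (ans + ((PySem.List.pyRange (i : Int) ((i : Int) + (m : Int))).map (dynBTerm s i)).sum,
         PySem.Dict.counter ((s.toList.drop i).take m)) := by
  induction m generalizing ans with
  | zero =>
    simp [PySem.List.pyRange]
    rfl
  | succ m ih =>
    have hle : (i : Int) ≤ (i : Int) + (m : Int) := by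
      have : (0:Int) ≤ (m:Int) := Int.natCast_nonneg m
      omega
    have hcast : (i : Int) + ((m : Nat) + 1 : Nat) = ((i : Int) + (m : Int)) + 1 := by push_cast; ring
    rw [hcast, PySem.List.pyRange_one_succ_right hle, List.foldl_append, ih (by omega)]
    -- one step at j = i + m
    have hidx : (i : Int) + (m : Int) = ((i + m : Nat) : Int) := by push_cast; ring
    have hlt : i + m < s.toList.length := by omega
    have hget : PySem.Str.pyGet? s ((i : Int) + (m : Int)) = some (s.toList[i + m]) := by
      rw [hidx]
      simp only [PySem.Str.pyGet?, PySem.Chars.pyGet?]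
      rw [PySem.List.pyGet?_natCast, List.getElem?_eq_getElem hlt]
    have hslice : (PySem.Str.slice s (some (i : Int)) (some ((i : Int) + (m : Int) + 1))).toList
        = (s.toList.drop i).take (m + 1) := by
      have hc : (i : Int) + (m : Int) + 1 = (i : Int) + ((m + 1 : Nat) : Int) := by push_cast; ring
      rw [hc]
      simp only [PySem.Str.slice, PySem.Chars.slice]
      rw [PySem.List.slice_natCast_add]
      simp
    have htake : (s.toList.drop i).take m ++ [s.toList[i + m]] = (s.toList.drop i).take (m + 1) := by
      rw [List.take_add_one]
      congr 1
      have hm : m < (s.toList.drop i).length := by rw [List.length_drop]; omega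
      rw [List.getElem?_eq_getElem hm, List.getElem_drop]
      rfl
    simp only [List.foldl_cons, List.foldl_nil, dynAStep, hget, List.map_append, List.map_cons,
      List.map_nil, List.sum_append, List.sum_cons, List.sum_nil]
    rw [dynA_dict_step, ← counter_snoc, htake]
    refine Prod.ext ?_ rfl
    show ans + _ + _ = ans + _
    simp only [dynBTerm, beauty_eq_counter, hslice]
    ring

theorem inner_eq (s : String) (i : Int) (hi : 0 ≤ i) (hin : i < PySem.Str.len s) (ans : Int) :
    ((PySem.List.pyRange i (PySem.Str.len s)).foldl (dynAStep s) (ans, PySem.Dict.empty)).1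
      = ans + ((PySem.List.pyRange i (PySem.Str.len s)).map (dynBTerm s i)).sum := by
  obtain ⟨i', rfl⟩ : ∃ i' : Nat, (i' : Int) = i := ⟨i.toNat, Int.toNat_of_nonneg hi⟩
  have hlen := PySem.Str.len_eq s
  rw [hlen] at hin ⊢
  have hi' : i' < s.toList.length := by exact_mod_cast hin
  have hn : (s.toList.length : Int) = (i' : Int) + ((s.toList.length - i' : Nat) : Int) := by
    omega
  rw [hn, inner_inv s i' (s.toList.length - i') (by omega) ans]

-- ===== VERDICT (by name: the statement is the Claim_ definition above) =====
theorem dynamicProcess_spec : Claim_equal_dynamicProcess := by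
  intro s _
  unfold Spec_dynamicProcess dynamicProcess dynamicProcess_alt
  have houter :
      (PySem.List.pyRange 0 (PySem.Str.len s)).foldl
        (fun ans i => ((PySem.List.pyRange i (PySem.Str.len s)).foldl (dynAStep s)
          (ans, PySem.Dict.empty)).1) 0
        = (PySem.List.pyRange 0 (PySem.Str.len s)).foldl
            (fun ans i => ans + ((PySem.List.pyRange i (PySem.Str.len s)).map
              (dynBTerm s i)).sum) 0 := by
    apply PySem.List.foldl_congr_mem
    intro ans i hi
    rcases PySem.List.mem_pyRange_one.1 hi with ⟨h0, hn⟩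
    exact inner_eq s i h0 hn ans
  rw [houter, PySem.List.foldl_add]
  show 0 + _ = _
  simp only [List.flatMap_def, List.sum_flatten, List.map_map]
  rw [zero_add]
  simp only [Function.comp_def]
  refine congrArg (List.sum (α := Int)) (List.map_congr_left fun i _ => ?_)
  refine congrArg (List.sum (α := Int)) (List.map_congr_left fun j _ => ?_)
  simp [dynBTerm, PySem.Str.slice, PySem.Chars.slice]
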